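-- pv_equiv track=rewrite | github.com/andresfma/projects_with_py | games_with_py/punto_fijo.py | obtener_puntos_fijos
-- ===== SOURCE A (Python) =====
-- def obtener_puntos_fijos(num_usuario, num_secreto):
--     if num_usuario == num_secreto:
--         return '''
-- ░░░█▀█░█▀▄░▀█▀░█░█░▀█▀░█▀█░█▀█░█▀▀░▀█▀░█▀▀░░░█░█
-- ░░░█▀█░█░█░░█░░▀▄▀░░█░░█░█░█▀█░▀▀█░░█░░█▀▀░░░▀░▀
-- ░░░▀░▀░▀▀░░▀▀▀░░▀░░▀▀▀░▀░▀░▀░▀░▀▀▀░░▀░░▀▀▀░░░▀░▀'''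
--
--     pista = []
--
--     for i in range(len(num_usuario)):
--         if num_usuario[i] == num_secreto[i]:
--             pista.append('fijo')
--         elif num_usuario[i] in num_secreto:
--             pista.append('punto')
--
--     if len(pista) == 0:
--         return 'tablas'
--
--     pista.sort()
--
--     return ' '.join(pista)
-- ===== SOURCE B (Python) =====
-- def obtener_puntos_fijos(num_usuario, num_secreto):
--     if num_usuario == num_secreto:
--         return '''
-- ░░░█▀█░█▀▄░▀█▀░█░█░▀█▀░█▀█░█▀█░█▀▀░▀█▀░█▀▀░░░█░█
-- ░░░█▀█░█░█░░█░░▀▄▀░░█░░█░█░█▀█░▀▀█░░█░░█▀▀░░░▀░▀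
-- ░░░▀░▀░▀▀░░▀▀▀░░▀░░▀▀▀░▀░▀░▀░▀░▀▀▀░░▀░░▀▀▀░░░▀░▀'''
--
--     secretos = set(num_secreto)
--     pares = list(zip(num_usuario, num_secreto))
--     fijos = sum(u == s for u, s in pares)
--     puntos = sum(u != s and u in secretos for u, s in pares)
--
--     if fijos + puntos == 0:
--         return 'tablas'
--
--     # 'fijo' sorts before 'punto', so this is already the sorted hint list
--     return ' '.join(['fijo'] * fijos + ['punto'] * puntos)
-- ===== Notes on version B (the rewrite author's own statement) =====
-- stated objective: simpler
-- what changed: B drops A's indexed loop that appends 'fijo'/'punto' strings and sorts them: it precomputes set(num_secreto), pairs the strings with zip, obtains the two counts by two generator sums over the pairs, and emits ['fijo']*fijos + ['punto']*puntos directly (already sorted since 'fijo' < 'punto'); no index arithmetic, no per-position substring scan, no list build, no sort.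
import Mathlib
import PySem

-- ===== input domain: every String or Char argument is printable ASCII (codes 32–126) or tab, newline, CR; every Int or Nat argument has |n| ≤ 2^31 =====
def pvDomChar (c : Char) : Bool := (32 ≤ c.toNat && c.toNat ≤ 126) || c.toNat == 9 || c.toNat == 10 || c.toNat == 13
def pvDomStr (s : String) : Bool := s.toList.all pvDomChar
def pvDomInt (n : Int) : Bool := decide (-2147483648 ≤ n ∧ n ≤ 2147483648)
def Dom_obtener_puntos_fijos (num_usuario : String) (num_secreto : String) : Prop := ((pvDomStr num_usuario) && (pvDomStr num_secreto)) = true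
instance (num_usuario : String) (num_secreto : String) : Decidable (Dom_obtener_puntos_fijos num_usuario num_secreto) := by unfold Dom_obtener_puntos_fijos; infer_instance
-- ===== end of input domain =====

-- B replaces A's indexed append-then-sort loop with zip + a secret-digit set + two generator
-- sums, emitting ['fijo']*fijos ++ ['punto']*puntos directly ('fijo' < 'punto'): simpler.

-- the ASCII-art banner returned on an exact match (shared literal constant of both ports)
def pvArt : String := "\n░░░█▀█░█▀▄░▀█▀░█░█░▀█▀░█▀█░█▀█░█▀▀░▀█▀░█▀▀░░░█░█\n░░░█▀█░█░█░░█░░▀▄▀░░█░░█░█░█▀█░▀▀█░░█░░█▀▀░░░▀░▀\n░░░▀░▀░▀▀░░▀▀▀░░▀░░▀▀▀░▀░▀░▀░▀░▀▀▀░░▀░░▀▀▀░░░▀░▀"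

-- ===== PORT A =====
def obtener_puntos_fijos (num_usuario : String) (num_secreto : String) : String :=
  if num_usuario == num_secreto then pvArt
  else
    let u := num_usuario.toList
    let s := num_secreto.toList
    -- pista.append inside the i-loop; pyGetD is exact under Pre_ (in-range indices)
    let pista := (PySem.List.pyRange 0 (PySem.Str.len num_usuario) 1).foldl
      (fun (acc : List String) i =>
        if PySem.List.pyGetD u i ' ' == PySem.List.pyGetD s i ' ' then acc ++ ["fijo"]
        else if PySem.Chars.isIn [PySem.List.pyGetD u i ' '] s then acc ++ ["punto"]
        else acc) []
    if pista.length == 0 then "tablas"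
    else PySem.Str.join " " (PySem.List.sorted pista (fun x => x) false)

-- ===== PORT B =====
def obtener_puntos_fijos_alt (num_usuario : String) (num_secreto : String) : String :=
  if num_usuario == num_secreto then pvArt
  else
    let secretos := PySem.Set.ofList num_secreto.toList
    let pares := List.zip num_usuario.toList num_secreto.toList
    let fijos := (pares.map (fun p => if p.1 == p.2 then 1 else 0)).sum
    let puntos := (pares.map (fun p => if p.1 != p.2 && PySem.Set.contains secretos p.1 then 1 else 0)).sum
    if fijos + puntos == 0 then "tablas"
    else PySem.Str.join " " (List.replicate fijos "fijo" ++ List.replicate puntos "punto")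

-- ===== PRECONDITION & SPEC =====
-- Pre_ excludes only the inputs on which A raises IndexError: a guess strictly longer than the
-- secret (and not equal to it) makes num_secreto[i] go out of range.
def Pre_obtener_puntos_fijos (num_usuario : String) (num_secreto : String) : Prop :=
  num_usuario = num_secreto ∨ num_usuario.toList.length ≤ num_secreto.toList.length
instance (num_usuario : String) (num_secreto : String) : Decidable (Pre_obtener_puntos_fijos num_usuario num_secreto) := by unfold Pre_obtener_puntos_fijos; infer_instance

def pvWitness_obtener_puntos_fijos : String × String := ("123", "321")

def Spec_obtener_puntos_fijos (num_usuario : String) (num_secreto : String) (out : String) : Prop := out = obtener_puntos_fijos_alt num_usuario num_secreto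
instance (num_usuario : String) (num_secreto : String) (out : String) : Decidable (Spec_obtener_puntos_fijos num_usuario num_secreto out) := by unfold Spec_obtener_puntos_fijos; infer_instance

-- ===== CLAIM (what is proved, stated in full; the proofs are below) =====
def Claim_equal_obtener_puntos_fijos : Prop := ∀ (num_usuario : String) (num_secreto : String), Dom_obtener_puntos_fijos num_usuario num_secreto → Pre_obtener_puntos_fijos num_usuario num_secreto → Spec_obtener_puntos_fijos num_usuario num_secreto (obtener_puntos_fijos num_usuario num_secreto)
-- ===== LEMMAS AND PROOFS =====

-- the hint emitted for one pair of digits, against the full secret t (a 0/1-element list)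
def pvH (t : List Char) (p : Char × Char) : List String :=
  if p.1 == p.2 then ["fijo"]
  else if PySem.Chars.isIn [p.1] t then ["punto"]
  else []

-- A's loop body at index k, with the membership scan over a fixed list t
def pvG (u s t : List Char) (k : Nat) : List String :=
  pvH t (u.getD k ' ', s.getD k ' ')

theorem pvA_loop (u s : List Char) (l : List Nat) (acc : List String) :
    l.foldl (fun (acc : List String) k =>
        if u.getD k ' ' == s.getD k ' ' then acc ++ ["fijo"]
        else if PySem.Chars.isIn [u.getD k ' '] s then acc ++ ["punto"]
        else acc) acc = acc ++ l.flatMap (pvG u s s) := by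
  have hb : (fun (acc : List String) k =>
        if u.getD k ' ' == s.getD k ' ' then acc ++ ["fijo"]
        else if PySem.Chars.isIn [u.getD k ' '] s then acc ++ ["punto"]
        else acc)
      = fun acc k => acc ++ pvG u s s k := by
    funext acc k
    unfold pvG pvH
    split_ifs <;> simp
  rw [hb, PySem.List.foldl_append_eq_flatMap]

-- the range/getD traversal equals the zip traversal when the guess is not longer
theorem pv_range_eq_zip (t : List Char) : ∀ (u s : List Char), u.length ≤ s.length →
    (List.range u.length).flatMap (pvG u s t) = (u.zip s).flatMap (pvH t) := by
  intro u
  induction u with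
  | nil => intro s _; simp
  | cons a u ih =>
    intro s hs
    cases s with
    | nil => simp at hs
    | cons b s =>
      simp only [List.length_cons, List.range_succ_eq_map, List.flatMap_cons,
        List.flatMap_map, List.zip_cons_cons]
      have h0 : pvG (a :: u) (b :: s) t 0 = pvH t (a, b) := by simp [pvG]
      have hk : (fun k => pvG (a :: u) (b :: s) t (k + 1)) = pvG u s t := by
        funext k; simp [pvG]
      rw [h0, hk, ih s (by simpa using hs)]

theorem pv_count_fijo (t : List Char) (l : List (Char × Char)) :
    (l.flatMap (pvH t)).count "fijo"
      = (l.map (fun p => if p.1 == p.2 then 1 else 0)).sum := by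
  induction l with
  | nil => simp
  | cons p l ih =>
    simp only [List.flatMap_cons, List.count_append, List.map_cons, List.sum_cons, ih]
    unfold pvH
    split_ifs <;> simp

theorem pv_mem_contains (t : List Char) (c : Char) :
    PySem.Set.contains (PySem.Set.ofList t) c = PySem.Chars.isIn [c] t := by
  by_cases h : c ∈ t
  · rw [(PySem.Set.contains_iff _ _).mpr ((PySem.Set.mem_ofList _ _).mpr h),
      (PySem.Chars.isIn_iff_infix _ _).mpr (List.singleton_infix_iff _ _ |>.mpr h)]
  · have h1 : PySem.Set.contains (PySem.Set.ofList t) c = false := by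
      rw [← Bool.not_eq_true]
      exact fun hh => h ((PySem.Set.mem_ofList _ _).mp ((PySem.Set.contains_iff _ _).mp hh))
    have h2 : PySem.Chars.isIn [c] t = false := by
      rw [← Bool.not_eq_true, PySem.Chars.isIn_iff_infix]
      exact fun hh => h ((List.singleton_infix_iff _ _).mp hh)
    rw [h1, h2]

theorem pv_count_punto (t : List Char) (l : List (Char × Char)) :
    (l.flatMap (pvH t)).count "punto"
      = (l.map (fun p => if p.1 != p.2 && PySem.Set.contains (PySem.Set.ofList t) p.1 then 1 else 0)).sum := by
  induction l with
  | nil => simp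
  | cons p l ih =>
    simp only [List.flatMap_cons, List.count_append, List.map_cons, List.sum_cons, ih,
      pv_mem_contains]
    unfold pvH
    by_cases h1 : (p.1 == p.2) = true
    · simp [h1, bne]
    · by_cases h2 : PySem.Chars.isIn [p.1] t = true
      · simp [h1, h2, bne]
      · simp [h1, h2, bne]

theorem pvH_mem (t : List Char) (l : List (Char × Char)) :
    ∀ x ∈ l.flatMap (pvH t), x = "fijo" ∨ x = "punto" := by
  intro x hx
  obtain ⟨k, -, hk⟩ := List.mem_flatMap.1 hx
  unfold pvH at hk
  split_ifs at hk <;> simp_all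

theorem pv_count_len (l : List String) (h : ∀ x ∈ l, x = "fijo" ∨ x = "punto") :
    l.count "fijo" + l.count "punto" = l.length := by
  induction l with
  | nil => simp
  | cons x t ih =>
    have ht := ih (fun y hy => h y (by simp [hy]))
    rcases h x (by simp) with hx | hx <;> subst hx <;> simp <;> omega

theorem pv_perm (l : List String) (h : ∀ x ∈ l, x = "fijo" ∨ x = "punto") :
    (List.replicate (l.count "fijo") "fijo" ++ List.replicate (l.count "punto") "punto").Perm l := by
  induction l with
  | nil => simp
  | cons x t ih =>
    have ht := ih (fun y hy => h y (by simp [hy]))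
    rcases h x (by simp) with hx | hx <;> subst hx
    · have h1 : ("fijo" :: t).count "fijo" = t.count "fijo" + 1 := by simp
      have h2 : ("fijo" :: t).count "punto" = t.count "punto" := by simp
      rw [h1, h2, List.replicate_succ, List.cons_append]
      exact ht.cons _
    · have h1 : ("punto" :: t).count "fijo" = t.count "fijo" := by simp
      have h2 : ("punto" :: t).count "punto" = t.count "punto" + 1 := by simp
      rw [h1, h2, List.replicate_succ]
      exact List.perm_middle.trans (ht.cons _)

theorem pv_sorted (l : List String) (h : ∀ x ∈ l, x = "fijo" ∨ x = "punto") :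
    PySem.List.sorted l (fun x => x) false
      = List.replicate (l.count "fijo") "fijo" ++ List.replicate (l.count "punto") "punto" := by
  refine PySem.List.sorted_id_eq_of_perm_of_pairwise l _ (pv_perm l h) ?_
  apply List.pairwise_append.2
  refine ⟨List.pairwise_replicate.2 (Or.inr le_rfl), List.pairwise_replicate.2 (Or.inr le_rfl), ?_⟩
  intro a ha b hb
  rw [List.eq_of_mem_replicate ha, List.eq_of_mem_replicate hb, String.le_iff_toList_le]
  decide

-- ===== VERDICT (by name: the statement is the Claim_ definition above) =====
theorem obtener_puntos_fijos_spec : Claim_equal_obtener_puntos_fijos := by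
  intro nu ns _ hpre
  unfold Spec_obtener_puntos_fijos obtener_puntos_fijos obtener_puntos_fijos_alt
  by_cases h : nu == ns
  · simp [h]
  · have hlen : nu.toList.length ≤ ns.toList.length := by
      rcases hpre with h' | h'
      · exact absurd (beq_iff_eq.mpr h') (by simpa using h)
      · exact h'
    simp only [h, PySem.Str.len_eq, PySem.List.pyRange_zero_natCast, List.foldl_map,
      PySem.List.pyGetD_natCast]
    rw [pvA_loop, pv_range_eq_zip _ _ _ hlen]
    simp only [List.nil_append]
    have hall := pvH_mem ns.toList (nu.toList.zip ns.toList)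
    rw [← pv_count_fijo ns.toList, ← pv_count_punto ns.toList, ← pv_count_len _ hall,
      pv_sorted _ hall]
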